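-- pv_equiv track=rewrite | github.com/apostlez/algorithm-Exams | 2024q2/3_counting.py | removeRobot
-- ===== SOURCE A (Python) =====
-- def removeRobot(robots, L, U, B, N):
--     max_guard = -1
--     stack = [(robots, L[:], U[:])]  # 스택에는 (robots, L, U)의 튜플을 저장
--
--     while stack:
--         current_robots, current_L, current_U = stack.pop()
--
--         # base case: L의 합이 0인 경우
--         if sum(current_L) == 0:
--             available_build = [0] * len(current_U)
--             for robot in current_robots:
--                 if B > L[robot[1]] + available_build[robot[1]]:
--                     available_build[robot[1]] += 1
--                 if available_build[robot[1]] > current_U[robot[1]]: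
--                     available_build[robot[1]] = current_U[robot[1]]
--             max_guard = max(max_guard, sum(available_build))
--             continue
--
--         found = False
--         for ir in range(len(current_robots)):
--             if current_L[current_robots[ir][1]] > 0:
--                 found = True
--                 new_L = current_L[:]
--                 new_U = current_U[:]
--                 new_L[current_robots[ir][1]] -= 1
--                 new_U[current_robots[ir][1]] -= 1
--                 new_robots = current_robots[:ir] + current_robots[ir+1:]
--                 stack.append((new_robots, new_L, new_U))
--
--         if not found:
--             return -1
--
--     return max_guard
-- ===== SOURCE B (Python) =====
-- def removeRobot(robots, L, U, B, N):
--     class Infeasible(Exception):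
--         pass
--
--     def base_count(robots_now, U_cur):
--         build = [0] * len(U_cur)
--         for _, g in robots_now:
--             if B > L[g] + build[g]:
--                 build[g] += 1
--             if build[g] > U_cur[g]:
--                 build[g] = U_cur[g]
--         return sum(build)
--
--     def rec(robots_cur, L_cur, U_cur):
--         if sum(L_cur) == 0:
--             return base_count(robots_cur, U_cur)
--         best = None
--         for i in range(len(robots_cur)):
--             g = robots_cur[i][1]
--             if L_cur[g] > 0:
--                 nL = L_cur[:]
--                 nU = U_cur[:]
--                 nL[g] -= 1
--                 nU[g] -= 1
--                 v = rec(robots_cur[:i] + robots_cur[i + 1:], nL, nU)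
--                 best = v if best is None else max(best, v)
--         if best is None:
--             raise Infeasible
--         return best
--
--     try:
--         return max(-1, rec(robots, list(L), list(U)))
--     except Infeasible:
--         return -1
-- ===== Notes on version B (the rewrite author's own statement) =====
-- stated objective: alternative
-- what changed: Replaces A's explicit-stack worklist DFS (with a global early `return -1` poisoning the whole search) by a recursive search that returns the maximum over the removable robots per node and signals infeasibility with an exception caught at the top level.
-- outside the precondition, e.g. on removeRobot([(0, 0)], [-1], [], 0, 0): A returns -1, B returns -1
import Mathlib
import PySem

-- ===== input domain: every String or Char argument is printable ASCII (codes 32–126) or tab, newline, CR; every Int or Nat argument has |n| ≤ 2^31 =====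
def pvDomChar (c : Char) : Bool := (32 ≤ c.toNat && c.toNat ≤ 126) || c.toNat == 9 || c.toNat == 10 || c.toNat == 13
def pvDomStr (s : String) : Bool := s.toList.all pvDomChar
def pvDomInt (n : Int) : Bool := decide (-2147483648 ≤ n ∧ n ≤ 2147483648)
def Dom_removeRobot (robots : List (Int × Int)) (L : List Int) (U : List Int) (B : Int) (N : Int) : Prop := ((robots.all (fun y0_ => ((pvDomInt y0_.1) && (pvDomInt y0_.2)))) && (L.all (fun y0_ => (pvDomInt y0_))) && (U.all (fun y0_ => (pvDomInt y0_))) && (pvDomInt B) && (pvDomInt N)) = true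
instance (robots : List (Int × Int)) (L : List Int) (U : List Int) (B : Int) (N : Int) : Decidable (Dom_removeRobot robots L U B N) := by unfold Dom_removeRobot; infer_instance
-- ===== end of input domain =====

-- B replaces A's explicit-stack DFS by a recursive search that returns the max over the
-- removable robots and signals infeasibility by an exception (Option in the port); same
-- values, no speed claim.

-- ===== PORT A =====
-- base-case count of A: builds available_build over current robots, reading the ORIGINAL L
-- (indices may be negative: Python wraparound via pyGetD/pySetD; out-of-range excluded by Pre_)
def aBase (B : Int) (L : List Int) (robots : List (Int × Int)) (Uc : List Int) : Int :=
  (robots.foldl (fun build r =>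
    let b1 := if B > PySem.List.pyGetD L r.2 0 + PySem.List.pyGetD build r.2 0
              then PySem.List.pySetD build r.2 (PySem.List.pyGetD build r.2 0 + 1) else build
    if PySem.List.pyGetD b1 r.2 0 > PySem.List.pyGetD Uc r.2 0
    then PySem.List.pySetD b1 r.2 (PySem.List.pyGetD Uc r.2 0) else b1)
    (List.replicate Uc.length 0)).sum

-- A's inner `for ir in range(len(current_robots))` loop: the list of children pushed, in push
-- order (ascending ir); `pre` is the reversed processed prefix.  `found` is `≠ []`.
def collectA (Lc Uc : List Int) (pre rest : List (Int × Int)) :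
    List ((List (Int × Int)) × List Int × List Int) :=
  match rest with
  | [] => []
  | r :: rs =>
    if PySem.List.pyGetD Lc r.2 0 > 0 then
      (pre.reverse ++ rs,
       PySem.List.pySetD Lc r.2 (PySem.List.pyGetD Lc r.2 0 - 1),
       PySem.List.pySetD Uc r.2 (PySem.List.pyGetD Uc r.2 0 - 1)) :: collectA Lc Uc (r :: pre) rs
    else collectA Lc Uc (r :: pre) rs

-- termination measure for the while-stack loop
def pvWeight (n : (List (Int × Int)) × List Int × List Int) : Nat := (n.1.length + 1).factorial
def pvStackW (s : List ((List (Int × Int)) × List Int × List Int)) : Nat := (s.map pvWeight).sum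

theorem pvStackW_append (a b : List ((List (Int × Int)) × List Int × List Int)) :
    pvStackW (a ++ b) = pvStackW a + pvStackW b := by
  simp [pvStackW]

theorem pvStackW_reverse (a : List ((List (Int × Int)) × List Int × List Int)) :
    pvStackW a.reverse = pvStackW a := by
  simp [pvStackW, List.sum_reverse]

theorem collectA_weight (Lc Uc : List Int) :
    ∀ (rest pre : List (Int × Int)),
      pvStackW (collectA Lc Uc pre rest) ≤ rest.length * (pre.length + rest.length).factorial := by
  intro rest
  induction rest with
  | nil => intro pre; simp [collectA, pvStackW]
  | cons r rs ih =>
    intro pre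
    simp only [collectA, List.length_cons]
    have e2 : pre.length + (rs.length + 1) = pre.length + rs.length + 1 := by omega
    rw [e2]
    split
    · have h := ih (r :: pre)
      simp only [pvStackW, List.map_cons, List.sum_cons, pvWeight, List.length_append,
        List.length_reverse, List.length_cons] at h ⊢
      have e1 : pre.length + 1 + rs.length = pre.length + rs.length + 1 := by omega
      rw [e1] at h
      generalize (pre.length + rs.length + 1).factorial = F at h ⊢
      rw [Nat.succ_mul]
      omega
    · have h := ih (r :: pre)
      simp only [pvStackW, List.length_cons] at h ⊢
      have e1 : pre.length + 1 + rs.length = pre.length + rs.length + 1 := by omega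
      rw [e1] at h
      generalize (pre.length + rs.length + 1).factorial = F at h ⊢
      rw [Nat.succ_mul]
      omega

-- the while-stack loop of A; Lean list head = top of the Python stack (pop = head,
-- `stack.append` of the children in ir-order = prepending their reverse)
def loopA (B : Int) (L : List Int) :
    List ((List (Int × Int)) × List Int × List Int) → Int → Int
  | [], acc => acc
  | (r, lc, uc) :: rest, acc =>
    if lc.sum = 0 then loopA B L rest (max acc (aBase B L r uc))
    else if collectA lc uc [] r = [] then -1
    else loopA B L ((collectA lc uc [] r).reverse ++ rest) acc
  termination_by stack _ => pvStackW stack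
  decreasing_by
  · have := Nat.factorial_pos (r.length + 1)
    simp only [pvStackW, List.map_cons, List.sum_cons, pvWeight]
    omega
  · rw [pvStackW_append, pvStackW_reverse]
    have h1 := collectA_weight lc uc r []
    simp only [List.length_nil, Nat.zero_add, pvStackW] at h1
    have h2 : r.length * r.length.factorial < (r.length + 1).factorial := by
      rw [Nat.factorial_succ]
      exact (Nat.mul_lt_mul_right (Nat.factorial_pos _)).mpr (by omega)
    simp only [pvStackW, List.map_cons, List.sum_cons, pvWeight]
    omega

def removeRobot (robots : List (Int × Int)) (L : List Int) (U : List Int) (B : Int) (N : Int) : Int :=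
  loopA B L [(robots, L, U)] (-1)

-- ===== PORT B =====
-- B's base_count helper (same computation as A's base case, reading the original L)
def bBase (B : Int) (L : List Int) (robots : List (Int × Int)) (Uc : List Int) : Int :=
  (robots.foldl (fun build r =>
    let b1 := if B > PySem.List.pyGetD L r.2 0 + PySem.List.pyGetD build r.2 0
              then PySem.List.pySetD build r.2 (PySem.List.pyGetD build r.2 0 + 1) else build
    if PySem.List.pyGetD b1 r.2 0 > PySem.List.pyGetD Uc r.2 0
    then PySem.List.pySetD b1 r.2 (PySem.List.pyGetD Uc r.2 0) else b1)
    (List.replicate Uc.length 0)).sum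

-- rec/for-loop of B; `none` = the Infeasible exception (it propagates, i.e. short-circuits)
mutual
def recB (B : Int) (L : List Int) (robots : List (Int × Int)) (Lc Uc : List Int) : Option Int :=
  if Lc.sum = 0 then some (bBase B L robots Uc)
  else childB B L [] robots Lc Uc none
  termination_by (robots.length, 1, 0)
  decreasing_by
    simp only [List.length_nil, Nat.zero_add]
    exact Prod.Lex.right _ (Prod.Lex.left _ _ (by omega))

def childB (B : Int) (L : List Int) (pre rest : List (Int × Int)) (Lc Uc : List Int)
    (best : Option Int) : Option Int :=
  match rest with
  | [] => best
  | r :: rs =>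
    if PySem.List.pyGetD Lc r.2 0 > 0 then
      match recB B L (pre.reverse ++ rs)
          (PySem.List.pySetD Lc r.2 (PySem.List.pyGetD Lc r.2 0 - 1))
          (PySem.List.pySetD Uc r.2 (PySem.List.pyGetD Uc r.2 0 - 1)) with
      | none => none
      | some v =>
        childB B L (r :: pre) rs Lc Uc (some (match best with | none => v | some b => max b v))
    else childB B L (r :: pre) rs Lc Uc best
  termination_by (pre.length + rest.length, 0, rest.length)
  decreasing_by
    · simp only [List.length_append, List.length_reverse, List.length_cons]
      exact Prod.Lex.left _ _ (by omega)
    · simp only [List.length_cons]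
      have e : pre.length + (rs.length + 1) = pre.length + 1 + rs.length := by omega
      rw [e]
      exact Prod.Lex.right _ (Prod.Lex.right _ (by omega))
    · simp only [List.length_cons]
      have e : pre.length + (rs.length + 1) = pre.length + 1 + rs.length := by omega
      rw [e]
      exact Prod.Lex.right _ (Prod.Lex.right _ (by omega))
end

def removeRobot_alt (robots : List (Int × Int)) (L : List Int) (U : List Int) (B : Int) (N : Int) : Int :=
  match recB B L robots L U with
  | none => -1
  | some v => max (-1) v

-- ===== PRECONDITION & SPEC =====
-- Pre_ excludes inputs containing a robot whose group index is out of range for L or for U: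
-- there the searches hit IndexError (on a few such inputs A happens to return -1 before
-- touching the bad index, and B agrees; the rest raise).
def Pre_removeRobot (robots : List (Int × Int)) (L : List Int) (U : List Int) (B : Int) (N : Int) : Prop :=
  ∀ r ∈ robots, PySem.Raise.InRange L.length r.2 ∧ PySem.Raise.InRange U.length r.2
instance (robots : List (Int × Int)) (L : List Int) (U : List Int) (B : Int) (N : Int) : Decidable (Pre_removeRobot robots L U B N) := by unfold Pre_removeRobot; infer_instance

def pvWitness_removeRobot : (List (Int × Int)) × List Int × List Int × Int × Int :=
  ([(0, 0), (1, 1), (2, 0)], [1, 1], [2, 2], 2, 2)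

def Spec_removeRobot (robots : List (Int × Int)) (L : List Int) (U : List Int) (B : Int) (N : Int) (out : Int) : Prop := out = removeRobot_alt robots L U B N
instance (robots : List (Int × Int)) (L : List Int) (U : List Int) (B : Int) (N : Int) (out : Int) : Decidable (Spec_removeRobot robots L U B N out) := by unfold Spec_removeRobot; infer_instance

-- ===== CLAIM (what is proved, stated in full; the proofs are below) =====
def Claim_equal_removeRobot : Prop := ∀ (robots : List (Int × Int)) (L : List Int) (U : List Int) (B : Int) (N : Int), Dom_removeRobot robots L U B N → Pre_removeRobot robots L U B N → Spec_removeRobot robots L U B N (removeRobot robots L U B N)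

-- ===== LEMMAS AND PROOFS =====

-- fold of recB over a list of stack nodes with an Int accumulator; none = some node infeasible
def gOpt (B : Int) (L : List Int) :
    List ((List (Int × Int)) × List Int × List Int) → Int → Option Int
  | [], acc => some acc
  | n :: ns, acc =>
    match recB B L n.1 n.2.1 n.2.2 with
    | none => none
    | some v => gOpt B L ns (max acc v)

-- same fold with an Option accumulator, the shape of childB's `best`
def mOpt (B : Int) (L : List Int) :
    Option Int → List ((List (Int × Int)) × List Int × List Int) → Option Int
  | b, [] => b
  | b, n :: ns =>
    match recB B L n.1 n.2.1 n.2.2 with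
    | none => none
    | some v => mOpt B L (some (match b with | none => v | some x => max x v)) ns

theorem bases_eq (B : Int) (L : List Int) (robots : List (Int × Int)) (Uc : List Int) :
    bBase B L robots Uc = aBase B L robots Uc := rfl

theorem childB_eq_mOpt (B : Int) (L : List Int) :
    ∀ (rest pre : List (Int × Int)) (Lc Uc : List Int) (best : Option Int),
      childB B L pre rest Lc Uc best = mOpt B L best (collectA Lc Uc pre rest) := by
  intro rest
  induction rest with
  | nil => intro pre Lc Uc best; simp [childB, collectA, mOpt]
  | cons r rs ih =>
    intro pre Lc Uc best
    rw [childB, collectA]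
    split
    · cases h : recB B L (pre.reverse ++ rs)
          (PySem.List.pySetD Lc r.2 (PySem.List.pyGetD Lc r.2 0 - 1))
          (PySem.List.pySetD Uc r.2 (PySem.List.pyGetD Uc r.2 0 - 1)) with
      | none => simp [mOpt, h]
      | some v => simp only [mOpt, h, ih]
    · exact ih (r :: pre) Lc Uc best

theorem gOpt_append (B : Int) (L : List Int)
    (xs ys : List ((List (Int × Int)) × List Int × List Int)) (acc : Int) :
    gOpt B L (xs ++ ys) acc = (gOpt B L xs acc).bind (fun m => gOpt B L ys m) := by
  induction xs generalizing acc with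
  | nil => simp [gOpt]
  | cons n ns ih =>
    rw [List.cons_append, gOpt, gOpt]
    cases recB B L n.1 n.2.1 n.2.2 with
    | none => simp
    | some v => simp only [ih]

theorem gOpt_acc (B : Int) (L : List Int)
    (xs : List ((List (Int × Int)) × List Int × List Int)) (acc v : Int) :
    gOpt B L xs (max acc v) = (gOpt B L xs acc).map (fun m => max m v) := by
  induction xs generalizing acc with
  | nil => simp [gOpt]
  | cons n ns ih =>
    rw [gOpt, gOpt]
    cases recB B L n.1 n.2.1 n.2.2 with
    | none => simp
    | some u =>
      simp only
      rw [max_right_comm, ih (max acc u)]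

theorem gOpt_reverse (B : Int) (L : List Int)
    (cs : List ((List (Int × Int)) × List Int × List Int)) (acc : Int) :
    gOpt B L cs.reverse acc = gOpt B L cs acc := by
  induction cs generalizing acc with
  | nil => simp
  | cons c cs' ih =>
    rw [List.reverse_cons, gOpt_append, gOpt]
    cases h : recB B L c.1 c.2.1 c.2.2 with
    | none =>
      cases hg : gOpt B L cs'.reverse acc <;> simp [gOpt, h]
    | some v =>
      rw [ih]
      have : (gOpt B L cs' acc).bind (fun m => gOpt B L [c] m)
          = (gOpt B L cs' acc).map (fun m => max m v) := by
        cases gOpt B L cs' acc <;> simp [gOpt, h]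
      rw [this, ← gOpt_acc]

theorem mOpt_some (B : Int) (L : List Int)
    (cs : List ((List (Int × Int)) × List Int × List Int)) (x : Int) :
    mOpt B L (some x) cs = gOpt B L cs x := by
  induction cs generalizing x with
  | nil => simp [mOpt, gOpt]
  | cons n ns ih =>
    rw [mOpt, gOpt]
    cases recB B L n.1 n.2.1 n.2.2 with
    | none => simp
    | some v => simp only [ih]

theorem gOpt_eq_mOpt_none (B : Int) (L : List Int)
    (c : (List (Int × Int)) × List Int × List Int)
    (cs : List ((List (Int × Int)) × List Int × List Int)) (acc : Int) :
    gOpt B L (c :: cs) acc = (mOpt B L none (c :: cs)).map (fun v => max acc v) := by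
  rw [gOpt, mOpt]
  cases recB B L c.1 c.2.1 c.2.2 with
  | none => simp
  | some v =>
    simp only [mOpt_some]
    rw [max_comm acc v, gOpt_acc]
    cases gOpt B L cs v <;> simp [max_comm]

theorem loopA_eq_gOpt (B : Int) (L : List Int)
    (stack : List ((List (Int × Int)) × List Int × List Int)) (acc : Int) :
    loopA B L stack acc = match gOpt B L stack acc with | none => -1 | some v => v := by
  fun_induction loopA B L stack acc with
  | case1 acc => simp [gOpt]
  | case2 r lc uc rest acc hsum ih =>
    rw [gOpt]
    have hrec : recB B L r lc uc = some (bBase B L r uc) := by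
      rw [recB, if_pos hsum]
    rw [hrec, bases_eq] at *
    exact ih
  | case3 r lc uc rest acc hsum hcs =>
    rw [gOpt]
    have hrec : recB B L r lc uc = none := by
      rw [recB, if_neg hsum, childB_eq_mOpt, hcs]
      rfl
    rw [hrec]
  | case4 r lc uc rest acc hsum hcs ih =>
    rw [ih, gOpt_append, gOpt_reverse]
    have hrec : recB B L r lc uc = mOpt B L none (collectA lc uc [] r) := by
      rw [recB, if_neg hsum, childB_eq_mOpt]
    rw [gOpt]
    rw [hrec]
    obtain ⟨c, cs, hccs⟩ : ∃ c cs, collectA lc uc [] r = c :: cs := by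
      cases h : collectA lc uc [] r with
      | nil => exact absurd h hcs
      | cons c cs => exact ⟨c, cs, rfl⟩
    rw [hccs, gOpt_eq_mOpt_none]
    cases mOpt B L none (c :: cs) with
    | none => simp
    | some v => simp

-- ===== VERDICT (by name: the statement is the Claim_ definition above) =====
theorem removeRobot_spec : Claim_equal_removeRobot := by
  intro robots L U B N _ _
  unfold Spec_removeRobot removeRobot removeRobot_alt
  rw [loopA_eq_gOpt]
  simp only [gOpt]
  cases h : recB B L robots L U with
  | none => rfl
  | some v => simp
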